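-- pv_equiv track=rewrite | github.com/BruceYi119/python | npl2.py | delstopword
-- ===== SOURCE A (Python) =====
-- stop_words = ['is', 'a', 'will', 'be']
--
-- def delstopword(textlist):
--     result = []
--     for w in textlist:
--         tmp = w.split(' ')
--         for stopword in stop_words:
--             if stopword in tmp:
--                 tmp.remove(stopword)
--         result.append(' '.join(tmp))
--     return result
-- ===== SOURCE B (Python) =====
-- stop_words = ['is', 'a', 'will', 'be']
--
-- def delstopword(textlist):
--     stops = set(stop_words)
--     return [' '.join(t for t in w.split(' ') if t not in stops) for w in textlist]
-- ===== Notes on version B (the rewrite author's own statement) =====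
-- stated objective: simpler
-- what changed: Replaces A's per-stopword membership-scan + list.remove passes over the token list with a single filtering comprehension per string that drops every stopword token.
-- intended difference: On strings where some stopword token occurs more than once, A's list.remove deletes only the first occurrence and leaves the later duplicates in the output, while B removes every occurrence; removing all stopword occurrences is what stopword removal is meant to do. — e.g. on delstopword(["is is"]): A returns ["is"], B returns [""]
import Mathlib
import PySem

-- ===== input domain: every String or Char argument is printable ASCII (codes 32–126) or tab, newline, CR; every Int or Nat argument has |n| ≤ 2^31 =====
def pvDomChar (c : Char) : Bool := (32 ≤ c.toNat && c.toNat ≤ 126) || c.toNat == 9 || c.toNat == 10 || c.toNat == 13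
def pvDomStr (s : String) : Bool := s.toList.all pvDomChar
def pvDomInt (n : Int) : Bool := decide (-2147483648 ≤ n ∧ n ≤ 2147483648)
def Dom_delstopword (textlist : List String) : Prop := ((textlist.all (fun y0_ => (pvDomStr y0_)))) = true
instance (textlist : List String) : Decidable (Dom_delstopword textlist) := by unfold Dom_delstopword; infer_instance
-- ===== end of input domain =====

-- B replaces A's per-stopword scan-and-remove passes with one filtering pass per string
-- (objective: simpler); where a stopword token repeats, A keeps the later duplicates and
-- B removes them all — stated as the intended difference D_ below.


-- ===== PORT A =====
def pvStopWords : List String := ["is", "a", "will", "be"]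

-- literal port: for each w, tmp = w.split(' '); for each stopword, if present remove its
-- first occurrence (guarded list.remove); append ' '.join(tmp)
def delstopword (textlist : List String) : List String :=
  textlist.foldl
    (fun result w =>
      let tmp := (PySem.Str.split? w " ").getD []   -- sep ≠ "", so split? is some
      let tmp := pvStopWords.foldl
        (fun tmp stopword =>
          if tmp.contains stopword then (PySem.List.remove? tmp stopword).getD tmp else tmp)
        tmp
      result ++ [PySem.Str.join " " tmp])
    []

-- ===== PORT B =====
-- per string: keep exactly the tokens that are not stopwords, re-join with ' '
def delstopword_alt (textlist : List String) : List String :=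
  textlist.map
    (fun w =>
      PySem.Str.join " "
        (((PySem.Str.split? w " ").getD []).filter (fun t => !pvStopWords.contains t)))

-- ===== PRECONDITION & SPEC =====
-- On strings where some stopword token occurs more than once, A's list.remove deletes only
-- the first occurrence and leaves the later duplicates in the output, while B removes every
-- occurrence; removing all occurrences is what stopword removal is meant to do.
def D_delstopword (textlist : List String) : Prop :=
  ∃ w ∈ textlist, ∃ s ∈ pvStopWords, 2 ≤ ((PySem.Str.split? w " ").getD []).count s
instance (textlist : List String) : Decidable (D_delstopword textlist) := by
  unfold D_delstopword; infer_instance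

def Spec_delstopword (textlist : List String) (out : List String) : Prop :=
  ¬ D_delstopword textlist → out = delstopword_alt textlist
instance (textlist : List String) (out : List String) : Decidable (Spec_delstopword textlist out) := by unfold Spec_delstopword; infer_instance

def pvDiffWitness_delstopword : List String := ["is is"]
def pvDiffWitnessOut_delstopword : (List String) × (List String) := (["is"], [""])

-- ===== CLAIM (what is proved, stated in full; the proofs are below) =====
def Claim_unchanged_delstopword : Prop := ∀ (textlist : List String), Dom_delstopword textlist → Spec_delstopword textlist (delstopword textlist)
def Claim_changed_delstopword : Prop := Dom_delstopword (pvDiffWitness_delstopword) ∧ D_delstopword (pvDiffWitness_delstopword) ∧ delstopword (pvDiffWitness_delstopword) = pvDiffWitnessOut_delstopword.1 ∧ delstopword_alt (pvDiffWitness_delstopword) = pvDiffWitnessOut_delstopword.2 ∧ pvDiffWitnessOut_delstopword.1 ≠ pvDiffWitnessOut_delstopword.2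
def Claim_exact_delstopword : Prop := ∀ (textlist : List String), Dom_delstopword textlist → D_delstopword textlist → delstopword textlist ≠ delstopword_alt textlist

-- ===== LEMMAS AND PROOFS =====

-- A's guarded remove step is List.erase
theorem pvStep_eq_erase (tmp : List String) (s : String) :
    (if tmp.contains s then (PySem.List.remove? tmp s).getD tmp else tmp) = tmp.erase s := by
  by_cases h : s ∈ tmp
  · rw [if_pos (by simpa using h), PySem.List.remove?_eq_some_erase _ _ h]; rfl
  · rw [if_neg (by simpa using h), List.erase_of_not_mem h]

-- erasing a value occurring at most once is filtering it out
theorem pvErase_eq_filter (l : List String) (s : String) (h : l.count s ≤ 1) :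
    l.erase s = l.filter (fun t => !(t == s)) := by
  induction l with
  | nil => rfl
  | cons x xs ih =>
    by_cases hx : x = s
    · subst hx
      have hc : xs.count x = 0 := by
        have := h; rw [List.count_cons_self] at this; omega
      rw [List.erase_cons_head]
      rw [List.filter_cons_of_neg (by simp)]
      exact (List.filter_eq_self.mpr (fun a ha => by
        have : a ≠ x := by
          intro hax; subst hax
          exact absurd (List.count_pos_iff.mpr ha) (by omega)
        simp [this])).symm
    · have hcount : xs.count s ≤ 1 := by
        rw [List.count_cons] at h
        simpa [hx] using h
      rw [List.erase_cons_tail (by simpa using hx),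
        List.filter_cons_of_pos (by simp [hx]), ih hcount]

-- the sequence of erases over stopwords each occurring at most once is one filter
theorem pvFoldErase_eq_filter (sws : List String) (toks : List String)
    (h : ∀ s ∈ sws, toks.count s ≤ 1) :
    sws.foldl (fun tmp s => tmp.erase s) toks
      = toks.filter (fun t => !sws.contains t) := by
  induction sws generalizing toks with
  | nil => simp
  | cons s ss ih =>
    rw [List.foldl_cons, pvErase_eq_filter toks s (h s (by simp)),
      ih _ (fun s' hs' => le_trans (List.filter_sublist.count_le _) (h s' (by simp [hs'])))]
    rw [List.filter_filter]
    apply List.filter_congr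
    intro t _
    by_cases hts : t = s <;> simp [hts, Bool.and_comm]

theorem pvFoldl_append_map {α β : Type} (f : α → β) (l : List α) (acc : List β) :
    l.foldl (fun r w => r ++ [f w]) acc = acc ++ l.map f := by
  induction l generalizing acc with
  | nil => simp
  | cons x xs ih => simp [ih]

-- ---- tightness: inside D_ the two results differ ----

-- character measure of a token list: total token length plus token count
def pvM (l : List String) : Nat := (l.map (fun t => t.toList.length)).sum + l.length

theorem pvM_sublist (l m : List String) (h : List.Sublist l m) : pvM l ≤ pvM m := by
  unfold pvM
  have h1 : (l.map (fun t => t.toList.length)).sum ≤ (m.map (fun t => t.toList.length)).sum :=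
    List.Sublist.sum_le_sum (h.map _) (by simp)
  have h2 : l.length ≤ m.length := h.length_le
  omega

-- the length of ' '.join(x::rest) is the measure minus one
theorem pvLenJoin (rest : List String) (x : String) :
    (PySem.Str.join " " (x :: rest)).toList.length + 1 = pvM (x :: rest) := by
  induction rest generalizing x with
  | nil =>
    rw [PySem.Str.toList_join]
    simp [PySem.Chars.join_singleton, pvM]
  | cons y ys ih =>
    have hy := ih y
    rw [PySem.Str.toList_join] at hy ⊢
    simp only [List.map_cons] at hy ⊢
    rw [show (" ".toList) = [' '] from rfl] at hy ⊢
    rw [PySem.Chars.join_cons_cons]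
    have := hy
    simp only [pvM, List.map_cons, List.sum_cons, List.length_cons] at this ⊢
    simp only [List.length_append, List.length_cons, List.length_nil]
    omega

-- filtering out an element that the erase already dropped
theorem pvFilterErase (p : String → Bool) (l : List String) (s : String) (h : p s = false) :
    (l.erase s).filter p = l.filter p := by
  induction l with
  | nil => rfl
  | cons x xs ih =>
    by_cases hx : x = s
    · subst hx; rw [List.erase_cons_head, List.filter_cons_of_neg (by simp [h])]
    · rw [List.erase_cons_tail (by simpa using hx)]
      by_cases hp : p x = true
      · rw [List.filter_cons_of_pos hp, List.filter_cons_of_pos hp, ih]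
      · rw [List.filter_cons_of_neg (by simpa using hp),
          List.filter_cons_of_neg (by simpa using hp), ih]

-- dropping a present nonempty token costs at least 2 in the measure
theorem pvDropMem (m : List String) (s : String) (hm : s ∈ m) (hs : 1 ≤ s.toList.length) :
    pvM (m.filter (fun t => !(t == s))) + 2 ≤ pvM m := by
  induction m with
  | nil => cases hm
  | cons x xs ih =>
    by_cases hx : x = s
    · subst hx
      rw [List.filter_cons_of_neg (by simp)]
      have hle : pvM (xs.filter (fun t => !(t == x))) ≤ pvM xs :=
        pvM_sublist _ _ (List.filter_sublist)
      simp only [pvM, List.map_cons, List.sum_cons, List.length_cons] at *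
      omega
    · have hmem : s ∈ xs := by
        rcases List.mem_cons.mp hm with h | h
        · exact absurd h.symm hx
        · exact h
      rw [List.filter_cons_of_pos (by simp [hx])]
      have := ih hmem
      simp only [pvM, List.map_cons, List.sum_cons, List.length_cons] at *
      omega

-- splitting the head stopword out of the combined filter
theorem pvFilterConsSplit (s : String) (ss : List String) (l : List String) :
    l.filter (fun t => !(s :: ss).contains t)
      = (l.filter (fun t => !ss.contains t)).filter (fun t => !(t == s)) := by
  rw [List.filter_filter]
  apply List.filter_congr
  intro t _
  by_cases hts : t = s <;> simp [hts]

theorem pvMainLe (sws : List String) (toks : List String) :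
    pvM (toks.filter (fun t => !sws.contains t))
      ≤ pvM (sws.foldl (fun tmp s => tmp.erase s) toks) := by
  induction sws generalizing toks with
  | nil => simp [pvM]
  | cons s ss ih =>
    rw [List.foldl_cons]
    calc pvM (toks.filter (fun t => !(s :: ss).contains t))
        = pvM ((toks.erase s).filter (fun t => !(s :: ss).contains t)) := by
          rw [pvFilterErase _ _ _ (by simp)]
      _ = pvM (((toks.erase s).filter (fun t => !ss.contains t)).filter (fun t => !(t == s))) := by
          rw [pvFilterConsSplit]
      _ ≤ pvM ((toks.erase s).filter (fun t => !ss.contains t)) :=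
          pvM_sublist _ _ (List.filter_sublist)
      _ ≤ pvM (ss.foldl (fun tmp s => tmp.erase s) (toks.erase s)) := ih _

theorem pvMainStrict (sws : List String) (hnd : sws.Nodup)
    (hlen : ∀ s ∈ sws, 1 ≤ s.toList.length) (toks : List String)
    (hw : ∃ s ∈ sws, 2 ≤ toks.count s) :
    pvM (toks.filter (fun t => !sws.contains t)) + 2
      ≤ pvM (sws.foldl (fun tmp s => tmp.erase s) toks) := by
  induction sws generalizing toks with
  | nil => obtain ⟨s, hs, _⟩ := hw; cases hs
  | cons s ss ih =>
    have hsnotin : s ∉ ss := (List.nodup_cons.mp hnd).1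
    rw [List.foldl_cons]
    obtain ⟨s₀, hs₀, hc⟩ := hw
    rcases List.mem_cons.mp hs₀ with h0 | h0
    · -- the duplicated stopword is s itself
      subst h0
      have hmem : s₀ ∈ toks.erase s₀ := by
        have : 1 ≤ (toks.erase s₀).count s₀ := by
          have := List.count_erase_self (a := s₀) (l := toks)
          omega
        exact List.count_pos_iff.mp (by omega)
      have hkeep : s₀ ∈ (toks.erase s₀).filter (fun t => !ss.contains t) := by
        refine List.mem_filter.mpr ⟨hmem, by simpa using hsnotin⟩
      calc pvM (toks.filter (fun t => !(s₀ :: ss).contains t)) + 2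
          = pvM ((toks.erase s₀).filter (fun t => !(s₀ :: ss).contains t)) + 2 := by
            rw [pvFilterErase _ _ _ (by simp)]
        _ = pvM (((toks.erase s₀).filter (fun t => !ss.contains t)).filter (fun t => !(t == s₀))) + 2 := by
            rw [pvFilterConsSplit]
        _ ≤ pvM ((toks.erase s₀).filter (fun t => !ss.contains t)) :=
            pvDropMem _ _ hkeep (hlen s₀ (by simp))
        _ ≤ pvM (ss.foldl (fun tmp s => tmp.erase s) (toks.erase s₀)) := pvMainLe _ _
    · -- the duplicated stopword is in the tail
      have hne : s₀ ≠ s := fun h => hsnotin (h ▸ h0)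
      have hcnt : 2 ≤ (toks.erase s).count s₀ := by
        rw [List.count_erase_of_ne hne]; exact hc
      have hih := ih (List.nodup_cons.mp hnd).2 (fun t ht => hlen t (by simp [ht]))
        (toks.erase s) ⟨s₀, h0, hcnt⟩
      calc pvM (toks.filter (fun t => !(s :: ss).contains t)) + 2
          = pvM ((toks.erase s).filter (fun t => !(s :: ss).contains t)) + 2 := by
            rw [pvFilterErase _ _ _ (by simp)]
        _ = pvM (((toks.erase s).filter (fun t => !ss.contains t)).filter (fun t => !(t == s))) + 2 := by
            rw [pvFilterConsSplit]
        _ ≤ pvM ((toks.erase s).filter (fun t => !ss.contains t)) + 2 := by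
            have := pvM_sublist _ _ (List.filter_sublist
              (l := (toks.erase s).filter (fun t => !ss.contains t)) (p := fun t => !(t == s)))
            omega
        _ ≤ pvM (ss.foldl (fun tmp s => tmp.erase s) (toks.erase s)) := hih

-- per-string: duplicated stopword forces different join results
theorem pvStringsDiffer (w : String)
    (hw : ∃ s ∈ pvStopWords, 2 ≤ ((PySem.Str.split? w " ").getD []).count s) :
    PySem.Str.join " " (pvStopWords.foldl (fun tmp s => tmp.erase s)
        ((PySem.Str.split? w " ").getD []))
      ≠ PySem.Str.join " "
        (((PySem.Str.split? w " ").getD []).filter (fun t => !pvStopWords.contains t)) := by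
  have hstrict := pvMainStrict pvStopWords (by decide) (by decide)
    ((PySem.Str.split? w " ").getD []) hw
  revert hstrict
  generalize (pvStopWords.foldl (fun tmp s => tmp.erase s)
    ((PySem.Str.split? w " ").getD [])) = LA
  generalize (((PySem.Str.split? w " ").getD []).filter
    (fun t => !pvStopWords.contains t)) = LB
  intro hstrict heq
  have hlen : (PySem.Str.join " " LA).toList.length
      = (PySem.Str.join " " LB).toList.length := by rw [heq]
  cases LA with
  | nil => simp [pvM] at hstrict
  | cons a la =>
    have h1 := pvLenJoin la a
    cases LB with
    | nil =>
      have hjb : (PySem.Str.join " " ([] : List String)).toList.length = 0 := by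
        rw [PySem.Str.toList_join]; rfl
      rw [hjb] at hlen
      simp only [pvM, List.map_nil, List.sum_nil, List.length_nil, Nat.add_zero, Nat.zero_add]
        at hstrict
      simp only [pvM] at h1
      omega
    | cons b lb =>
      have h2 := pvLenJoin lb b
      simp only [pvM] at h1 h2 hstrict
      omega

-- ===== VERDICT (by name: the statement is the Claim_ definition above) =====
theorem delstopword_spec : Claim_unchanged_delstopword := by
  intro textlist _ hnd
  show delstopword textlist = delstopword_alt textlist
  unfold D_delstopword at hnd
  push Not at hnd
  unfold delstopword delstopword_alt
  rw [pvFoldl_append_map]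
  simp only [List.nil_append]
  apply List.map_congr_left
  intro w hw
  have hsteps : (fun (tmp : List String) stopword =>
      if tmp.contains stopword then (PySem.List.remove? tmp stopword).getD tmp else tmp)
      = fun tmp s => tmp.erase s := by
    funext tmp s; exact pvStep_eq_erase tmp s
  rw [hsteps, pvFoldErase_eq_filter]
  intro s hs
  have := hnd w hw s hs
  omega

theorem delstopword_changed : Claim_changed_delstopword := by
  unfold Claim_changed_delstopword; decide

theorem delstopword_tight : Claim_exact_delstopword := by
  intro textlist _ hD heq
  obtain ⟨w, hw, s, hs, hc⟩ := hD
  unfold delstopword delstopword_alt at heq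
  rw [pvFoldl_append_map] at heq
  simp only [List.nil_append] at heq
  have hper := (List.map_eq_map_iff.mp heq) w hw
  simp only at hper
  have hsteps : (fun (tmp : List String) stopword =>
      if tmp.contains stopword then (PySem.List.remove? tmp stopword).getD tmp else tmp)
      = fun tmp s => tmp.erase s := by
    funext tmp s; exact pvStep_eq_erase tmp s
  rw [hsteps] at hper
  exact pvStringsDiffer w ⟨s, hs, hc⟩ hper
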